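-- pv_equiv track=rewrite | github.com/PhreshPrince01/super-groud-assessment | codeAssessment.py | can_organize_books
-- ===== SOURCE A (Python) =====
-- from collections import Counter
-- import math
--
-- def can_organize_books(shelf):
--     book_counts = Counter(shelf)
--
--     frequencies = list(book_counts.values())
--     gcd_value = frequencies[0]
--
--     for count in frequencies[1:]:
--         gcd_value = math.gcd(gcd_value, count)
--
--     if gcd_value > 1:
--         return "YES"
--     else:
--         return "NO"
-- ===== SOURCE B (Python) =====
-- from collections import Counter
--
-- def can_organize_books(shelf):
--     frequencies = list(Counter(shelf).values())
--     m = min(frequencies)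
--     for d in range(2, m + 1):
--         if all(count % d == 0 for count in frequencies):
--             return "YES"
--     return "NO"
-- ===== Notes on version B (the rewrite author's own statement) =====
-- stated objective: alternative
-- what changed: Replaces the gcd fold over the frequency list by a direct trial-division search for a common divisor d in [2, min(frequencies)] that divides every count.
import Mathlib
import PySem

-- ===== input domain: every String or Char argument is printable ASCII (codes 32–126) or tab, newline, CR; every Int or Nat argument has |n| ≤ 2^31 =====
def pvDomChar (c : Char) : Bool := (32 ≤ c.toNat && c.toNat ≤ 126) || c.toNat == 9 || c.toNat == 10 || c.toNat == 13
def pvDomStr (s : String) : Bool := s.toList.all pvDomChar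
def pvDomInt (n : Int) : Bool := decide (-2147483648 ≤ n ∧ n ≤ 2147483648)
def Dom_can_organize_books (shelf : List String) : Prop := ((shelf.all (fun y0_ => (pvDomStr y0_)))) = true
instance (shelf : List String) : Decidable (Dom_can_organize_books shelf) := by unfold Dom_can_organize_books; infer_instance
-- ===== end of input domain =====

-- B replaces A's gcd fold by a trial-division search for a common divisor in [2, min]; same result, similar cost.
-- ===== PORT A =====
def can_organize_books (shelf : List String) : String :=
  let book_counts := PySem.Dict.counter shelf
  let frequencies := book_counts.values
  match PySem.List.pyGet? frequencies 0 with
  | none => ""   -- frequencies[0] raises IndexError on an empty shelf; excluded by Pre_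
  | some g0 =>
    let gcd_value := (PySem.List.slice frequencies (some 1) none).foldl
        (fun g c => ((Int.gcd g c : Nat) : Int)) g0
    if gcd_value > 1 then "YES" else "NO"

-- ===== PORT B =====
def can_organize_books_alt (shelf : List String) : String :=
  let frequencies := (PySem.Dict.counter shelf).values
  match PySem.List.min? frequencies (fun x => x) with
  | none => ""   -- min([]) raises ValueError on an empty shelf; excluded by Pre_
  | some m =>
    if (PySem.List.pyRange 2 (m + 1) 1).any
        (fun d => frequencies.all (fun c => PySem.Int.mod c d == 0))
    then "YES" else "NO"

-- ===== PRECONDITION & SPEC =====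
-- Pre_ excludes the empty shelf, on which A raises IndexError (and B raises ValueError).
def Pre_can_organize_books (shelf : List String) : Prop := shelf ≠ []
instance (shelf : List String) : Decidable (Pre_can_organize_books shelf) := by unfold Pre_can_organize_books; infer_instance
def pvWitness_can_organize_books : List String := ["a", "b", "a", "b"]

def Spec_can_organize_books (shelf : List String) (out : String) : Prop := out = can_organize_books_alt shelf
instance (shelf : List String) (out : String) : Decidable (Spec_can_organize_books shelf out) := by unfold Spec_can_organize_books; infer_instance

-- ===== CLAIM (what is proved, stated in full; the proofs are below) =====
def Claim_equal_can_organize_books : Prop := ∀ (shelf : List String), Dom_can_organize_books shelf → Pre_can_organize_books shelf → Spec_can_organize_books shelf (can_organize_books shelf)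

-- ===== LEMMAS AND PROOFS =====

theorem gcdFold_dvd (rest : List Int) (g0 : Int) :
    (rest.foldl (fun g c => ((Int.gcd g c : Nat) : Int)) g0) ∣ g0 ∧
    ∀ c ∈ rest, (rest.foldl (fun g c => ((Int.gcd g c : Nat) : Int)) g0) ∣ c := by
  induction rest generalizing g0 with
  | nil => exact ⟨dvd_refl _, by simp⟩
  | cons x t ih =>
    obtain ⟨h1, h2⟩ := ih ((Int.gcd g0 x : Nat) : Int)
    refine ⟨h1.trans (Int.gcd_dvd_left _ _), ?_⟩
    intro c hc
    rcases List.mem_cons.mp hc with rfl | hc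
    · exact h1.trans (Int.gcd_dvd_right _ _)
    · exact h2 c hc

theorem dvd_gcdFold (rest : List Int) (g0 d : Int) (h0 : d ∣ g0) (h : ∀ c ∈ rest, d ∣ c) :
    d ∣ (rest.foldl (fun g c => ((Int.gcd g c : Nat) : Int)) g0) := by
  induction rest generalizing g0 with
  | nil => exact h0
  | cons x t ih =>
    refine ih _ ?_ (fun c hc => h c (by simp [hc]))
    show d ∣ ((Int.gcd g0 x : Nat) : Int)
    rw [Int.coe_gcd]
    exact dvd_gcd h0 (h x (by simp))

theorem gcdFold_nonneg (rest : List Int) (g0 : Int) (h0 : 0 ≤ g0) :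
    0 ≤ (rest.foldl (fun g c => ((Int.gcd g c : Nat) : Int)) g0) := by
  induction rest generalizing g0 with
  | nil => exact h0
  | cons x t ih => exact ih _ (Int.natCast_nonneg _)

-- frequencies of the counter: nonempty and all ≥ 1
theorem counter_values_pos (shelf : List String) (c : Int)
    (hc : c ∈ (PySem.Dict.counter shelf).values) : 1 ≤ c := by
  have : (PySem.Dict.counter shelf).values
      = ((PySem.Set.ofList shelf).map (fun k => (shelf.count k : Int))) := by
    simp only [PySem.Dict.values, PySem.Dict.items_counter, List.map_map]
    rfl
  rw [this] at hc
  obtain ⟨k, hk, rfl⟩ := List.mem_map.mp hc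
  have hk' : k ∈ shelf := (PySem.Set.mem_ofList _ _).mp hk
  have : 1 ≤ shelf.count k := List.count_pos_iff.mpr hk'
  exact_mod_cast this

theorem counter_values_ne_nil (shelf : List String) (h : shelf ≠ []) :
    (PySem.Dict.counter shelf).values ≠ [] := by
  have : (PySem.Dict.counter shelf).values
      = ((PySem.Set.ofList shelf).map (fun k => (shelf.count k : Int))) := by
    simp only [PySem.Dict.values, PySem.Dict.items_counter, List.map_map]
    rfl
  rw [this]
  intro hmap
  rcases shelf with _ | ⟨x, xs⟩
  · exact h rfl
  · have : x ∈ PySem.Set.ofList (x :: xs) := (PySem.Set.mem_ofList _ _).mpr (by simp)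
    have := List.mem_map_of_mem (f := fun k => ((x :: xs).count k : Int)) this
    rw [hmap] at this
    exact absurd this (List.not_mem_nil)

-- the core: on a nonempty list of positive ints, "fold-gcd > 1" ↔ "some d in [2, min] divides all"
theorem core_iff (g0 : Int) (rest : List Int) (m : Int)
    (hpos : ∀ c ∈ g0 :: rest, 1 ≤ c)
    (hm : PySem.List.min? (g0 :: rest) (fun x => x) = some m) :
    ((rest.foldl (fun g c => ((Int.gcd g c : Nat) : Int)) g0) > 1) ↔
    ((PySem.List.pyRange 2 (m + 1) 1).any
        (fun d => (g0 :: rest).all (fun c => PySem.Int.mod c d == 0)) = true) := by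
  obtain ⟨hdvd0, hdvdrest⟩ := gcdFold_dvd rest g0
  have hmmem : m ∈ g0 :: rest := PySem.List.min?_mem hm
  have hmmin : ∀ y ∈ g0 :: rest, m ≤ y := fun y hy => PySem.List.min?_isMin hm y hy
  have hdvd_all : ∀ c ∈ g0 :: rest,
      (rest.foldl (fun g c => ((Int.gcd g c : Nat) : Int)) g0) ∣ c := by
    intro c hc
    rcases List.mem_cons.mp hc with rfl | hc
    · exact hdvd0
    · exact hdvdrest c hc
  constructor
  · intro hg1
    rw [List.any_eq_true]
    refine ⟨rest.foldl (fun g c => ((Int.gcd g c : Nat) : Int)) g0, ?_, ?_⟩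
    · rw [PySem.List.mem_pyRange_one]
      have hgm := hdvd_all m hmmem
      have hmpos : 0 < m := by have := hpos m hmmem; omega
      have := Int.le_of_dvd hmpos hgm
      omega
    · rw [List.all_eq_true]
      intro c hc
      have : (rest.foldl (fun g c => ((Int.gcd g c : Nat) : Int)) g0) ∣ c := hdvd_all c hc
      simpa [PySem.Int.mod_eq_zero_iff_dvd] using this
  · intro hany
    obtain ⟨d, hdmem, hdall⟩ := List.any_eq_true.mp hany
    rw [PySem.List.mem_pyRange_one] at hdmem
    rw [List.all_eq_true] at hdall
    have hddvd : ∀ c ∈ g0 :: rest, d ∣ c := by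
      intro c hc
      have := hdall c hc
      simpa [PySem.Int.mod_eq_zero_iff_dvd] using this
    have hdg := dvd_gcdFold rest g0 d (hddvd g0 (by simp)) (fun c hc => hddvd c (by simp [hc]))
    have hgnn := gcdFold_nonneg rest g0 (by have := hpos g0 (by simp); omega)
    have hgpos : 0 < rest.foldl (fun g c => ((Int.gcd g c : Nat) : Int)) g0 := by
      rcases lt_or_eq_of_le hgnn with h | h
      · exact h
      · exfalso
        rw [← h] at hdvd0
        have := zero_dvd_iff.mp hdvd0
        have := hpos g0 (by simp)
        omega
    have := Int.le_of_dvd hgpos hdg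
    omega

-- ===== VERDICT (by name: the statement is the Claim_ definition above) =====
theorem can_organize_books_spec : Claim_equal_can_organize_books := by
  intro shelf _ hpre
  have hne : (PySem.Dict.counter shelf).values ≠ [] := counter_values_ne_nil shelf hpre
  have hpos : ∀ c ∈ (PySem.Dict.counter shelf).values, (1:Int) ≤ c :=
    fun c hc => counter_values_pos shelf c hc
  simp only [Spec_can_organize_books, can_organize_books, can_organize_books_alt]
  revert hne hpos
  generalize (PySem.Dict.counter shelf).values = l
  intro hne hpos
  rcases l with _ | ⟨g0, rest⟩
  · exact absurd rfl hne
  · rw [PySem.List.pyGet?_zero_cons g0 rest, PySem.List.slice_from_one]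
    obtain ⟨m, hm⟩ : ∃ m, PySem.List.min? (g0 :: rest) (fun x : Int => x) = some m := by
      cases h : PySem.List.min? (g0 :: rest) (fun x : Int => x) with
      | none =>
        exfalso
        have := (PySem.List.min?_eq_none_iff _ _).mp h
        simp at this
      | some m => exact ⟨m, rfl⟩
    rw [hm]
    simp only [List.tail_cons]
    show (if (rest.foldl (fun g c => ((Int.gcd g c : Nat) : Int)) g0) > 1 then "YES" else "NO")
       = (if ((PySem.List.pyRange 2 (m + 1) 1).any
            (fun d => (g0 :: rest).all (fun c => PySem.Int.mod c d == 0)) = true) then "YES" else "NO")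
    have hiff := core_iff g0 rest m hpos hm
    by_cases hgt : (rest.foldl (fun g c => ((Int.gcd g c : Nat) : Int)) g0) > 1
    · rw [if_pos hgt, if_pos (hiff.mp hgt)]
    · rw [if_neg hgt, if_neg (fun hany => hgt (hiff.mpr hany))]
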